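-- pv_equiv track=rewrite | github.com/eric22gh/Python-course | Interview_Practice/Day_41to45_off_exercises.py | CounthLetters
-- ===== SOURCE A (Python) =====
-- def CounthLetters(Phrase):
--     import string
--     aux = 0
--     if not Phrase:
--         return "The phrase is empty"
--     elif not isinstance(Phrase, str):
--         raise TypeError("I only accept text")
--     for letters in Phrase:
--         if letters not in string.punctuation and letters != " ":
--             aux += 1
--     return aux
-- ===== SOURCE B (Python) =====
-- import string
--
-- def CounthLetters(Phrase):
--     if not Phrase:
--         return "The phrase is empty"
--     elif not isinstance(Phrase, str):
--         raise TypeError("I only accept text")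
--     # Complement counting: build a character-frequency table in one pass,
--     # then subtract the frequencies of the 33 deletion characters from the total length.
--     freq = {}
--     for ch in Phrase:
--         freq[ch] = freq.get(ch, 0) + 1
--     return len(Phrase) - sum(freq.get(d, 0) for d in string.punctuation + ' ')
-- ===== Notes on version B (the rewrite author's own statement) =====
-- stated objective: alternative
-- what changed: Replaces A's direct filter-and-accumulate loop by complement counting: build a character-frequency dictionary in one pass, then return the total length minus the summed frequencies of the 33 punctuation/space characters.
-- outside the precondition, e.g. on CounthLetters(''): A returns 'The phrase is empty', B returns 'The phrase is empty'
import Mathlib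
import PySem

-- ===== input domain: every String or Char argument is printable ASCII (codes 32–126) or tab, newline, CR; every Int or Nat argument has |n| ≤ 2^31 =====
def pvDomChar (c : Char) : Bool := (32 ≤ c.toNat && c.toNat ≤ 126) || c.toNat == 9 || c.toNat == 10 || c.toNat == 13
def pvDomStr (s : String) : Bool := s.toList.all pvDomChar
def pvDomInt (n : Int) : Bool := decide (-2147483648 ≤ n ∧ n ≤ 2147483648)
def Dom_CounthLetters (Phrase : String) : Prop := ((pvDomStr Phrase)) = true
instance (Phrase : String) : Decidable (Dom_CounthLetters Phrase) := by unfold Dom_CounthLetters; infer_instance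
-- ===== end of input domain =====

-- B replaces A's direct filter-and-accumulate loop by complement counting: a frequency
-- dictionary built in one pass, then total length minus the summed frequencies of the
-- 33 punctuation/space characters (alternative decomposition, similar cost).
-- ===== PORT A =====
-- string.punctuation
def pvPunct : List Char := "!\"#$%&'()*+,-./:;<=>?@[\\]^_`{|}~".toList

-- loop: for letters in Phrase: if letters not in punctuation and letters != ' ': aux += 1
def CounthLetters (Phrase : String) : Int :=
  Phrase.toList.foldl (fun aux c => if c ∉ pvPunct ∧ c ≠ ' ' then aux + 1 else aux) 0

-- ===== PORT B =====
-- the deletion alphabet: string.punctuation + ' '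
def pvDelete : List Char := pvPunct ++ [' ']

-- freq = {}; for ch in Phrase: freq[ch] = freq.get(ch, 0) + 1
-- return len(Phrase) - sum(freq.get(d, 0) for d in string.punctuation + ' ')
def CounthLetters_alt (Phrase : String) : Int :=
  let freq := Phrase.toList.foldl (fun d ch => d.insert ch (d.getD ch 0 + 1))
    (PySem.Dict.empty : PySem.Dict Char Int)
  (Phrase.toList.length : Int) - (pvDelete.map (fun d => freq.getD d 0)).sum

-- ===== PRECONDITION & SPEC =====
-- Pre_ excludes only the empty string, on which A (and B) return a non-int message string.
def Pre_CounthLetters (Phrase : String) : Prop := Phrase.toList ≠ []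
instance (Phrase : String) : Decidable (Pre_CounthLetters Phrase) := by unfold Pre_CounthLetters; infer_instance
def pvWitness_CounthLetters : String := "a b!"

def Spec_CounthLetters (Phrase : String) (out : Int) : Prop := out = CounthLetters_alt Phrase
instance (Phrase : String) (out : Int) : Decidable (Spec_CounthLetters Phrase out) := by unfold Spec_CounthLetters; infer_instance

-- ===== CLAIM (what is proved, stated in full; the proofs are below) =====
def Claim_equal_CounthLetters : Prop := ∀ (Phrase : String), Dom_CounthLetters Phrase → Pre_CounthLetters Phrase → Spec_CounthLetters Phrase (CounthLetters Phrase)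

-- ===== LEMMAS AND PROOFS =====
-- a 0/1-indicator summed over a duplicate-free list is a membership test
lemma pvSum_indicator (c : Char) (D : List Char) (hD : D.Nodup) :
    (D.map (fun d => if c = d then (1 : Int) else 0)).sum
      = if c ∈ D then (1 : Int) else 0 := by
  induction D with
  | nil => simp
  | cons d ds ih =>
    rcases List.nodup_cons.mp hD with ⟨hd, hds⟩
    by_cases h : c = d
    · subst h
      simp [List.map_cons, ih hds, hd]
    · simp [List.map_cons, ih hds, h]

-- summed per-character counts over the (duplicate-free) deletion alphabet = countP of membership
lemma pvSum_counts (l : List Char) :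
    (pvDelete.map (fun d => (l.count d : Int))).sum
      = (l.countP (fun c => decide (c ∈ pvDelete)) : Int) := by
  induction l with
  | nil => simp
  | cons c t ih =>
    have hnd : pvDelete.Nodup := by decide
    have : (pvDelete.map (fun d => ((c :: t).count d : Int)))
        = (pvDelete.map (fun d => (t.count d : Int) + if c = d then 1 else 0)) := by
      apply List.map_congr_left
      intro d _
      by_cases h : c = d <;> simp [h]
    rw [this]
    rw [PySem.List.sum_map_add_int, ih, pvSum_indicator c pvDelete hnd]
    by_cases h : c ∈ pvDelete <;> simp [h]

-- ===== VERDICT (by name: the statement is the Claim_ definition above) =====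
theorem CounthLetters_spec : Claim_equal_CounthLetters := by
  intro Phrase _ _
  unfold Spec_CounthLetters CounthLetters CounthLetters_alt
  have h1 : (pvDelete.map (fun d =>
      (Phrase.toList.foldl (fun d ch => d.insert ch (d.getD ch 0 + 1))
        (PySem.Dict.empty : PySem.Dict Char Int)).getD d 0)).sum
      = (Phrase.toList.countP (fun c => decide (c ∈ pvDelete)) : Int) := by
    rw [show (pvDelete.map (fun d =>
        (Phrase.toList.foldl (fun d ch => d.insert ch (d.getD ch 0 + 1))
          (PySem.Dict.empty : PySem.Dict Char Int)).getD d 0))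
        = pvDelete.map (fun d => (Phrase.toList.count d : Int)) from by
      apply List.map_congr_left
      intro d _
      rw [PySem.Dict.getD_foldl_insert_add_one]
      simp]
    exact pvSum_counts Phrase.toList
  have h2 : Phrase.toList.length
      = Phrase.toList.countP (fun c => decide (c ∉ pvPunct ∧ c ≠ ' '))
        + Phrase.toList.countP (fun c => decide (c ∈ pvDelete)) := by
    rw [List.length_eq_countP_add_countP (fun c => decide (c ∉ pvPunct ∧ c ≠ ' '))]
    congr 1
    apply List.countP_congr
    intro c _
    simp [pvDelete, or_comm]
  rw [PySem.List.foldl_ite_add_one]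
  simp only [h1]
  rw [h2]
  push_cast
  ring
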